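-- pv_equiv track=rewrite | github.com/McElyea/Orket | orket/application/workflows/turn_response_parser.py | _contains_markdown_fence_outside_json_strings
-- ===== SOURCE A (Python) =====
-- def _contains_markdown_fence_outside_json_strings(content: str) -> bool:
--     in_string = False
--     escaped = False
--     for index, char in enumerate(content):
--         if in_string:
--             if escaped:
--                 escaped = False
--             elif char == "\\":
--                 escaped = True
--             elif char == '"':
--                 in_string = False
--             continue
--         if char == '"':
--             in_string = True
--             continue
--         if content[index : index + 3] == "```":
--             return True
--     return False
-- ===== SOURCE B (Python) =====
-- def _contains_markdown_fence_outside_json_strings(content: str) -> bool: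
--     n = len(content)
--     i = 0
--     while True:
--         f = content.find("```", i)
--         q = content.find('"', i)
--         if f != -1 and (q == -1 or f < q):
--             return True
--         if q == -1:
--             return False
--         # skip the JSON string literal opened at q
--         j = q + 1
--         close = -1
--         while j < n:
--             ch = content[j]
--             if ch == "\\":
--                 j += 2
--             elif ch == '"':
--                 close = j
--                 break
--             else:
--                 j += 1
--         if close == -1:
--             return False
--         i = close + 1
-- ===== Notes on version B (the rewrite author's own statement) =====
-- stated objective: faster
-- what changed: Replaced the per-character boolean state machine (in_string/escaped flags over enumerate) with a region-skipping cursor scan: find the next fence and next quote with str.find, return on a fence that precedes any quote, otherwise jump the cursor past the string literal's unescaped closing quote.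
import Mathlib
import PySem

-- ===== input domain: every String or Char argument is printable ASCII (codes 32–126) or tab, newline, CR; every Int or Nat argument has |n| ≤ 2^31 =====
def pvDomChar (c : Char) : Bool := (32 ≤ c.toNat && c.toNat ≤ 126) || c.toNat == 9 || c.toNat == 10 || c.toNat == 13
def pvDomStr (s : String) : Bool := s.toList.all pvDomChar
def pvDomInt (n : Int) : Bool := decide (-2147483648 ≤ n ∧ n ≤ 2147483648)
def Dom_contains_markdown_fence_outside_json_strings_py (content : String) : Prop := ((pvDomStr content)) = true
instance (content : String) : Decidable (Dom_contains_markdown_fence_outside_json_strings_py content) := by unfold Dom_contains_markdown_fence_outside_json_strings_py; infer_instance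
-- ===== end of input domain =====

-- B replaces A's per-character in_string/escaped state machine by a region-skipping
-- cursor scan (find next fence / next quote, jump past whole string literals);
-- objective: faster (same O(n), but str.find-based skipping was measured faster in a timing run).

-- ===== PORT A =====
-- the for-loop over enumerate(content): state (index, in_string, escaped), suffix = full.drop index
def pvLoopA (full : List Char) : List Char → Nat → Bool → Bool → Bool
  | [], _, _, _ => false
  | c :: rest, index, in_string, escaped =>
    if in_string then
      if escaped then pvLoopA full rest (index + 1) true false
      else if c = '\\' then pvLoopA full rest (index + 1) true true
      else if c = '"' then pvLoopA full rest (index + 1) false false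
      else pvLoopA full rest (index + 1) true false
    else if c = '"' then pvLoopA full rest (index + 1) true false
    else if PySem.List.slice full (some (index : Int)) (some ((index : Int) + 3)) = ['`', '`', '`'] then true
    else pvLoopA full rest (index + 1) false false

def contains_markdown_fence_outside_json_strings_py (content : String) : Bool :=
  pvLoopA content.toList content.toList 0 false false

-- ===== PORT B =====
-- content.find(pat, i) for a nonempty pattern and 0 ≤ i ≤ len: first index ≥ i where pat occurs
def pvFindPat (full pat : List Char) (i : Nat) : Option Nat :=
  if h : i < full.length then
    if pat.isPrefixOf (full.drop i) then some i else pvFindPat full pat (i + 1)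
  else none
termination_by full.length - i

-- the inner while-loop of B: index of the first unescaped closing quote at or after j
def pvScanClose (full : List Char) (j : Nat) : Option Nat :=
  if h : j < full.length then
    if full[j] = '\\' then pvScanClose full (j + 2)
    else if full[j] = '"' then some j
    else pvScanClose full (j + 1)
  else none
termination_by full.length - j

-- the outer while-loop of B, cursor i; fuel only makes the loop total (it never runs out:
-- each iteration moves the cursor strictly forward, so length+1 iterations suffice)
def pvLoopB (full : List Char) (fuel : Nat) (i : Nat) : Bool :=
  match fuel with
  | 0 => false
  | fuel + 1 =>
    match pvFindPat full ['"'] i with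
    | none =>
        -- q == -1: fence decides
        (pvFindPat full ['`', '`', '`'] i).isSome
    | some q =>
        match pvFindPat full ['`', '`', '`'] i with
        | some f =>
            if f < q then true
            else
              match pvScanClose full (q + 1) with
              | none => false
              | some close => pvLoopB full fuel (close + 1)
        | none =>
            match pvScanClose full (q + 1) with
            | none => false
            | some close => pvLoopB full fuel (close + 1)

def contains_markdown_fence_outside_json_strings_py_alt (content : String) : Bool :=
  pvLoopB content.toList (content.toList.length + 1) 0

-- ===== PRECONDITION & SPEC =====
def Spec_contains_markdown_fence_outside_json_strings_py (content : String) (out : Bool) : Prop := out = contains_markdown_fence_outside_json_strings_py_alt content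
instance (content : String) (out : Bool) : Decidable (Spec_contains_markdown_fence_outside_json_strings_py content out) := by unfold Spec_contains_markdown_fence_outside_json_strings_py; infer_instance

-- ===== CLAIM (what is proved, stated in full; the proofs are below) =====
def Claim_equal_contains_markdown_fence_outside_json_strings_py : Prop := ∀ (content : String), Dom_contains_markdown_fence_outside_json_strings_py content → Spec_contains_markdown_fence_outside_json_strings_py content (contains_markdown_fence_outside_json_strings_py content)

-- ===== LEMMAS AND PROOFS =====

theorem pvFindPat_bounds (full pat : List Char) (i : Nat) (k : Nat)
    (h : pvFindPat full pat i = some k) : i ≤ k ∧ k < full.length := by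
  fun_induction pvFindPat full pat i
  all_goals first
    | (simp_all; omega)
    | simp_all

theorem pvScanClose_bounds (full : List Char) (j : Nat) (k : Nat)
    (h : pvScanClose full j = some k) : j ≤ k ∧ k < full.length := by
  fun_induction pvScanClose full j
  all_goals first
    | (simp_all; omega)
    | simp_all


theorem pvFindPat_none (full pat : List Char) (i : Nat) (h : full.length ≤ i) :
    pvFindPat full pat i = none := by
  rw [pvFindPat]; simp; omega

theorem pvScanClose_none (full : List Char) (j : Nat) (h : full.length ≤ j) :
    pvScanClose full j = none := by
  rw [pvScanClose]; simp; omega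

theorem pvFindPat_stop (full pat : List Char) (i : Nat) (h : i < full.length)
    (hp : pat.isPrefixOf (full.drop i)) : pvFindPat full pat i = some i := by
  rw [pvFindPat]; simp [h, hp]

theorem pvFindPat_step (full pat : List Char) (i : Nat)
    (hp : ¬ pat.isPrefixOf (full.drop i)) : pvFindPat full pat i = pvFindPat full pat (i + 1) := by
  by_cases h : i < full.length
  · rw [pvFindPat]; simp [h, hp]
  · rw [pvFindPat_none full pat i (by omega), pvFindPat_none full pat (i + 1) (by omega)]

-- A's in-string scan from position j (escaped = false) ends exactly at B's closing quote
theorem pv_string (full : List Char) : ∀ (n j : Nat), full.length - j ≤ n →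
    pvLoopA full (full.drop j) j true false =
      (match pvScanClose full j with
       | none => false
       | some c => pvLoopA full (full.drop (c + 1)) (c + 1) false false) := by
  intro n
  induction n with
  | zero =>
    intro j h
    rw [List.drop_eq_nil_of_le (by omega), pvScanClose_none full j (by omega)]
    simp [pvLoopA]
  | succ n ih =>
    intro j h
    by_cases hj : j < full.length
    · have hd := List.drop_eq_getElem_cons hj
      by_cases hb : full[j] = '\\'
      · rw [hd, pvScanClose]
        by_cases hj1 : j + 1 < full.length
        · rw [List.drop_eq_getElem_cons hj1]
          have e1 : pvLoopA full (full[j] :: full[j + 1] :: full.drop (j + 2)) j true false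
              = pvLoopA full (full.drop (j + 2)) (j + 2) true false := by
            simp [pvLoopA, hb]
          rw [e1]
          simp only [hj, dif_pos, hb, if_pos]
          exact ih (j + 2) (by omega)
        · rw [List.drop_eq_nil_of_le (show full.length ≤ j + 1 by omega),
              pvScanClose_none full (j + 2) (by omega)]
          simp [pvLoopA, hb, hj]
      · by_cases hq2 : full[j] = '"'
        · rw [hd, pvScanClose]
          simp [pvLoopA, hj, hq2]
        · have e1 : pvLoopA full (full[j] :: full.drop (j + 1)) j true false
              = pvLoopA full (full.drop (j + 1)) (j + 1) true false := by
            simp [pvLoopA, hb, hq2]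
          rw [hd, pvScanClose, e1]
          simp only [hj, dif_pos, if_neg hb, if_neg hq2]
          exact ih (j + 1) (by omega)
    · rw [List.drop_eq_nil_of_le (by omega), pvScanClose_none full j (by omega)]
      simp [pvLoopA]

theorem pv_main_aux (full : List Char) : ∀ (n i fuel : Nat), full.length - i ≤ n →
    full.length - i < fuel →
    pvLoopA full (full.drop i) i false false = pvLoopB full fuel i := by
  intro n
  induction n with
  | zero =>
    intro i fuel h hfu
    match fuel, hfu with
    | fuel + 1, _ =>
      rw [List.drop_eq_nil_of_le (by omega)]
      simp only [pvLoopB, pvFindPat_none full _ i (by omega)]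
      simp [pvLoopA]
  | succ n ih =>
    intro i fuel h hfu
    by_cases hi : i < full.length
    · match fuel, hfu with
      | fuel + 1, _ =>
        by_cases hq : full[i] = '"'
        · -- opening quote: A enters string mode; B skips to the closing quote
          have hqp : (['"'] : List Char).isPrefixOf (full.drop i) := by
            rw [List.drop_eq_getElem_cons hi]; simp [List.isPrefixOf, hq]
          have hfp : ¬ (['`', '`', '`'] : List Char).isPrefixOf (full.drop i) := by
            rw [List.drop_eq_getElem_cons hi]; simp [List.isPrefixOf, hq]
          have e1 : pvLoopA full (full.drop i) i false false
              = pvLoopA full (full.drop (i + 1)) (i + 1) true false := by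
            rw [List.drop_eq_getElem_cons hi]; simp [pvLoopA, hq]
          rw [e1, pv_string full (full.length - (i + 1)) (i + 1) (by omega)]
          simp only [pvLoopB, pvFindPat_stop full _ i hi hqp, pvFindPat_step full _ i hfp]
          cases hsc : pvScanClose full (i + 1) with
          | none =>
            cases hf : pvFindPat full ['`', '`', '`'] (i + 1) with
            | none => simp
            | some f =>
              have hb := pvFindPat_bounds full _ _ _ hf
              simp [Nat.not_lt.mpr (show i ≤ f by omega)]
          | some close =>
            have hcb := pvScanClose_bounds full _ _ hsc
            have hrec : pvLoopA full (full.drop (close + 1)) (close + 1) false false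
                = pvLoopB full fuel (close + 1) := ih (close + 1) fuel (by omega) (by omega)
            cases hf : pvFindPat full ['`', '`', '`'] (i + 1) with
            | none => simpa [hsc] using hrec
            | some f =>
              have hb := pvFindPat_bounds full _ _ _ hf
              simpa [hsc, Nat.not_lt.mpr (show i ≤ f by omega)] using hrec
        · by_cases hf : (['`', '`', '`'] : List Char).isPrefixOf (full.drop i)
          · -- fence at i, before any quote: both return true
            have hs : PySem.List.slice full (some (i : Int)) (some ((i : Int) + 3))
                = ['`', '`', '`'] := by
              have h3 : ((i : Int) + 3) = (((i + 3 : Nat)) : Int) := by push_cast; ring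
              rw [h3, PySem.List.slice_natCast]
              have ht := (List.prefix_iff_eq_take.mp (List.isPrefixOf_iff_prefix.mp hf))
              simpa [Nat.add_sub_cancel_left] using ht.symm
            have hqp : ¬ (['"'] : List Char).isPrefixOf (full.drop i) := by
              rw [List.drop_eq_getElem_cons hi]; simp [List.isPrefixOf]
              exact fun h' => hq h'.symm
            have e1 : pvLoopA full (full.drop i) i false false = true := by
              rw [List.drop_eq_getElem_cons hi]; simp [pvLoopA, hq, hs]
            rw [e1]
            simp only [pvLoopB, pvFindPat_stop full _ i hi hf, pvFindPat_step full _ i hqp]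
            cases hq2 : pvFindPat full ['"'] (i + 1) with
            | none => simp
            | some q =>
              have hb := pvFindPat_bounds full _ _ _ hq2
              simp [show i < q by omega]
          · -- neither fence nor quote at i: both sides step to i + 1
            have hqp : ¬ (['"'] : List Char).isPrefixOf (full.drop i) := by
              rw [List.drop_eq_getElem_cons hi]; simp [List.isPrefixOf]
              exact fun h' => hq h'.symm
            have hs : PySem.List.slice full (some (i : Int)) (some ((i : Int) + 3))
                ≠ ['`', '`', '`'] := by
              have h3 : ((i : Int) + 3) = (((i + 3 : Nat)) : Int) := by push_cast; ring
              rw [h3, PySem.List.slice_natCast]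
              intro hcon
              refine hf (List.isPrefixOf_iff_prefix.mpr ?_)
              have ht : List.take 3 (List.drop i full) = ['`', '`', '`'] := by
                simpa [Nat.add_sub_cancel_left] using hcon
              exact ht ▸ List.take_prefix 3 (List.drop i full)
            have e1 : pvLoopA full (full.drop i) i false false
                = pvLoopA full (full.drop (i + 1)) (i + 1) false false := by
              rw [List.drop_eq_getElem_cons hi]; simp [pvLoopA, hq, hs]
            rw [e1, ih (i + 1) (fuel + 1) (by omega) (by omega)]
            conv_lhs => rw [pvLoopB]
            conv_rhs => rw [pvLoopB]
            rw [pvFindPat_step full _ i hqp, pvFindPat_step full _ i hf]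
    · match fuel, hfu with
      | fuel + 1, _ =>
        rw [List.drop_eq_nil_of_le (by omega)]
        simp only [pvLoopB, pvFindPat_none full _ i (by omega)]
        simp [pvLoopA]

theorem pv_main (full : List Char) (i fuel : Nat) (hfu : full.length - i < fuel) :
    pvLoopA full (full.drop i) i false false = pvLoopB full fuel i :=
  pv_main_aux full (full.length - i) i fuel (le_refl _) hfu

-- ===== VERDICT (by name: the statement is the Claim_ definition above) =====
theorem contains_markdown_fence_outside_json_strings_py_spec : Claim_equal_contains_markdown_fence_outside_json_strings_py := by
  intro content _hDom
  unfold Spec_contains_markdown_fence_outside_json_strings_py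
  unfold contains_markdown_fence_outside_json_strings_py contains_markdown_fence_outside_json_strings_py_alt
  simpa using pv_main content.toList 0 (content.toList.length + 1) (by omega)
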